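-- pv_equiv track=rewrite | github.com/pypi-data/pypi-mirror-30 | packages/openmdao/openmdao-2.2.1.tar.gz/openmdao-2.2.1/openmdao/utils/coloring.py | _compute_ranges
-- ===== SOURCE A (Python) =====
-- def _compute_ranges(names, vois):
--     """
--     Get a list of varible ranges with one entry per row or column in the jacobian.
--
--     Parameters
--     ----------
--     names : iter of str
--         Names of vois.
--     vois : dict
--         Metadata of vois.
--
--     Returns
--     -------
--     list
--         List of size total_voi_size containing tuples of the form (start, end, name).
--     """
--     ranges = []
--     start = 0
--     end = -1
--     for name in names:
--         end += vois[name]['size']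
--         tup = (start, end, name)
--         ranges.extend([tup] * (end - start + 1))
--         start = end + 1
--
--     return ranges
-- ===== SOURCE B (Python) =====
-- def _compute_ranges(names, vois):
--     # Back-to-front recursive construction: the total size is computed first;
--     # the LAST name's block occupies [total - size, total - 1], and everything
--     # before it is built by recursing on the remaining names with the reduced total.
--     def build(ns, total):
--         if not ns:
--             return []
--         last = ns[-1]
--         size = vois[last]['size']
--         start = total - size
--         return build(ns[:-1], start) + [(start, total - 1, last)] * size
--
--     total = 0
--     for name in names:
--         total += vois[name]['size']
--     return build(names, total)
-- ===== Notes on version B (the rewrite author's own statement) =====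
-- stated objective: alternative
-- what changed: Replaces A's single forward loop with running start/end accumulators by a back-to-front recursive construction: the total size is summed first, then the output is built right-to-left by recursion peeling off the last name, whose block is placed at [total-size, total-1].
import Mathlib
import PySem

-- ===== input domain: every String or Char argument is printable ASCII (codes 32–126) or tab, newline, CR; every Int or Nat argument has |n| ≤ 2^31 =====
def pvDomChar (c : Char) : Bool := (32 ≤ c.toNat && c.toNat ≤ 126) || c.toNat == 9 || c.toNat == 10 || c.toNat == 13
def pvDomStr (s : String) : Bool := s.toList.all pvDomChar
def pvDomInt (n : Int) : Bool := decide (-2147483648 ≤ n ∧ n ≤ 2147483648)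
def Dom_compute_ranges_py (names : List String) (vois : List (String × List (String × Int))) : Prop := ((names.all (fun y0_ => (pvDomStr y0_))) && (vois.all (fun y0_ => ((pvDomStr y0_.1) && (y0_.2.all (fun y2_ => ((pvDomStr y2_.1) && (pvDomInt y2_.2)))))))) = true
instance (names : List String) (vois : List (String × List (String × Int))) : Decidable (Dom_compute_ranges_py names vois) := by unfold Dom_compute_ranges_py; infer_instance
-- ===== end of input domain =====

-- B replaces A's forward loop with running start/end accumulators by a back-to-front
-- recursive construction: total size first, then the last name's block is placed at
-- [total-size, total-1] and the rest built recursively. Objective: alternative.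

-- ===== PORT A =====
-- vois[name]['size'] as an Option (none = KeyError, excluded by Pre_); both ports read it via .getD 0,
-- which Pre_ guarantees is never taken.
def pyVoiSize? (vois : List (String × List (String × Int))) (name : String) : Option Int :=
  ((PySem.Dict.mk vois).get? name).bind (fun d => (PySem.Dict.mk d).get? "size")

def crStepA (vois : List (String × List (String × Int)))
    (st : List (Int × Int × String) × Int × Int) (name : String) :
    List (Int × Int × String) × Int × Int :=
  let e := st.2.2 + (pyVoiSize? vois name).getD 0
  let tup := (st.2.1, e, name)
  (st.1 ++ List.replicate (e - st.2.1 + 1).toNat tup, e + 1, e)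

def compute_ranges_py (names : List String) (vois : List (String × List (String × Int))) : List (Int × Int × String) :=
  (names.foldl (crStepA vois) ([], 0, -1)).1

-- ===== PORT B =====
-- build(ns, total): recursion on the names with the LAST element peeled off (ns[:-1]).
def crBuild (vois : List (String × List (String × Int))) :
    List String → Int → List (Int × Int × String)
  | [], _ => []
  | h :: t, total =>
    let last := (h :: t).getLast (by simp)
    let size := (pyVoiSize? vois last).getD 0
    let start := total - size
    crBuild vois (h :: t).dropLast start ++ List.replicate size.toNat (start, total - 1, last)
  termination_by ns _ => ns.length
  decreasing_by simp [List.length_dropLast]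

def compute_ranges_py_alt (names : List String) (vois : List (String × List (String × Int))) : List (Int × Int × String) :=
  let total := names.foldl (fun t name => t + (pyVoiSize? vois name).getD 0) 0
  crBuild vois names total

-- ===== PRECONDITION & SPEC =====
-- Pre_ excludes exactly the inputs on which Python A raises KeyError: a name absent
-- from vois, or a voi metadata dict without a 'size' key. (B raises there too.)
def Pre_compute_ranges_py (names : List String) (vois : List (String × List (String × Int))) : Prop :=
  ∀ name ∈ names, (pyVoiSize? vois name).isSome = true
instance (names : List String) (vois : List (String × List (String × Int))) : Decidable (Pre_compute_ranges_py names vois) := by unfold Pre_compute_ranges_py; infer_instance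

def pvWitness_compute_ranges_py : List String × (List (String × List (String × Int))) :=
  (["x", "y"], [("x", [("size", 2)]), ("y", [("size", 1)])])

def Spec_compute_ranges_py (names : List String) (vois : List (String × List (String × Int))) (out : List (Int × Int × String)) : Prop := out = compute_ranges_py_alt names vois
instance (names : List String) (vois : List (String × List (String × Int))) (out : List (Int × Int × String)) : Decidable (Spec_compute_ranges_py names vois out) := by unfold Spec_compute_ranges_py; infer_instance

-- ===== CLAIM (what is proved, stated in full; the proofs are below) =====
def Claim_equal_compute_ranges_py : Prop := ∀ (names : List String) (vois : List (String × List (String × Int))), Dom_compute_ranges_py names vois → Pre_compute_ranges_py names vois → Spec_compute_ranges_py names vois (compute_ranges_py names vois)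

-- ===== LEMMAS AND PROOFS =====

-- Common reference form: per-name inclusive ranges from a running start.
def pvSpecRanges (f : String → Int) : Int → List String → List (Int × Int × String)
  | _, [] => []
  | s, n :: ns => List.replicate (f n).toNat (s, s + f n - 1, n) ++ pvSpecRanges f (s + f n) ns

def pvSum (f : String → Int) (ns : List String) : Int := (ns.map f).sum

lemma crA_loop (vois : List (String × List (String × Int))) (ns : List String) :
    ∀ (acc : List (Int × Int × String)) (s : Int),
      (ns.foldl (crStepA vois) (acc, s, s - 1)).1
        = acc ++ pvSpecRanges (fun n => (pyVoiSize? vois n).getD 0) s ns := by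
  induction ns with
  | nil => intro acc s; simp [pvSpecRanges]
  | cons n ns ih =>
    intro acc s
    have hstep : crStepA vois (acc, s, s - 1) n
        = (acc ++ List.replicate ((pyVoiSize? vois n).getD 0).toNat
              (s, s + (pyVoiSize? vois n).getD 0 - 1, n),
           s + (pyVoiSize? vois n).getD 0,
           s + (pyVoiSize? vois n).getD 0 - 1) := by
      simp only [crStepA]
      generalize (pyVoiSize? vois n).getD 0 = v
      have h1 : s - 1 + v - s + 1 = v := by ring
      have h2 : s - 1 + v + 1 = s + v := by ring
      have h3 : s - 1 + v = s + v - 1 := by ring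
      rw [h1, h2, h3]
    simp only [List.foldl_cons, hstep]
    have := ih (acc ++ List.replicate ((pyVoiSize? vois n).getD 0).toNat
              (s, s + (pyVoiSize? vois n).getD 0 - 1, n)) (s + (pyVoiSize? vois n).getD 0)
    simpa [pvSpecRanges, List.append_assoc] using this

lemma specRanges_snoc (f : String → Int) (ns : List String) (n : String) :
    ∀ s, pvSpecRanges f s (ns ++ [n])
      = pvSpecRanges f s ns
        ++ List.replicate (f n).toNat (s + pvSum f ns, s + pvSum f ns + f n - 1, n) := by
  induction ns with
  | nil => intro s; simp [pvSpecRanges, pvSum]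
  | cons m ms ih =>
    intro s
    simp only [List.cons_append, pvSpecRanges, ih (s + f m), List.append_assoc]
    have : s + f m + pvSum f ms = s + pvSum f (m :: ms) := by
      simp [pvSum]; ring
    rw [this]

lemma crBuild_snoc (vois : List (String × List (String × Int))) (ns : List String)
    (n : String) (total : Int) :
    crBuild vois (ns ++ [n]) total
      = crBuild vois ns (total - (pyVoiSize? vois n).getD 0)
        ++ List.replicate ((pyVoiSize? vois n).getD 0).toNat
             (total - (pyVoiSize? vois n).getD 0, total - 1, n) := by
  cases ns with
  | nil => simp [crBuild]
  | cons h t =>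
    rw [show (h :: t) ++ [n] = h :: (t ++ [n]) from rfl, crBuild]
    simp only [show h :: (t ++ [n]) = (h :: t) ++ [n] from rfl, List.dropLast_concat,
        List.getLast_concat]

lemma crBuild_eq_spec (vois : List (String × List (String × Int))) (ns : List String) :
    ∀ s, crBuild vois ns (s + pvSum (fun n => (pyVoiSize? vois n).getD 0) ns)
      = pvSpecRanges (fun n => (pyVoiSize? vois n).getD 0) s ns := by
  induction ns using List.reverseRecOn with
  | nil => intro s; simp [crBuild, pvSpecRanges]
  | append_singleton ms m ih =>
    intro s
    rw [crBuild_snoc, specRanges_snoc]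
    have hsum : s + pvSum (fun n => (pyVoiSize? vois n).getD 0) (ms ++ [m])
        - (pyVoiSize? vois m).getD 0
        = s + pvSum (fun n => (pyVoiSize? vois n).getD 0) ms := by
      simp [pvSum]; ring
    rw [hsum, ih s]
    congr 2
    simp [pvSum]; ring

lemma foldl_sum (f : String → Int) (ns : List String) :
    ∀ t, ns.foldl (fun t name => t + f name) t = t + pvSum f ns := by
  induction ns with
  | nil => intro t; simp [pvSum]
  | cons m ms ih => intro t; simp only [List.foldl_cons, ih]; simp [pvSum]; ring

-- ===== VERDICT (by name: the statement is the Claim_ definition above) =====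
theorem compute_ranges_py_spec : Claim_equal_compute_ranges_py := by
  intro names vois _ _
  show compute_ranges_py names vois = compute_ranges_py_alt names vois
  have hA : compute_ranges_py names vois
      = pvSpecRanges (fun n => (pyVoiSize? vois n).getD 0) 0 names := by
    have h := crA_loop vois names [] 0
    norm_num at h
    simpa [compute_ranges_py] using h
  have hB : compute_ranges_py_alt names vois
      = pvSpecRanges (fun n => (pyVoiSize? vois n).getD 0) 0 names := by
    simp only [compute_ranges_py_alt, foldl_sum]
    have := crBuild_eq_spec vois names 0
    norm_num at this ⊢
    exact this
  rw [hA, hB]
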